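-- pv_equiv track=rewrite | github.com/yungommi/algorithm | programmers/level1/20231011/약수의개수와덧셈.py | get
-- ===== SOURCE A (Python) =====
-- def get(n):
--     ans = 0
--     for i in range(1,n+1):
--         if n%i == 0:
--             ans += 1
--     if ans % 2 == 0 :
--         return n
--     else:
--         return -n
-- ===== SOURCE B (Python) =====
-- def get(n):
--     # n has an odd number of divisors iff n is a perfect square,
--     # so find the least i >= 1 with i*i >= n and test i*i == n.
--     i = 1
--     while i * i < n:
--         i += 1
--     return -n if i * i == n else n
-- ===== Notes on version B (the rewrite author's own statement) =====
-- stated objective: faster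
-- what changed: Replaced the O(n) divisor-counting loop with an O(sqrt(n)) search for the least i with i*i >= n, using the fact that the divisor count is odd iff n is a perfect square.
import Mathlib
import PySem

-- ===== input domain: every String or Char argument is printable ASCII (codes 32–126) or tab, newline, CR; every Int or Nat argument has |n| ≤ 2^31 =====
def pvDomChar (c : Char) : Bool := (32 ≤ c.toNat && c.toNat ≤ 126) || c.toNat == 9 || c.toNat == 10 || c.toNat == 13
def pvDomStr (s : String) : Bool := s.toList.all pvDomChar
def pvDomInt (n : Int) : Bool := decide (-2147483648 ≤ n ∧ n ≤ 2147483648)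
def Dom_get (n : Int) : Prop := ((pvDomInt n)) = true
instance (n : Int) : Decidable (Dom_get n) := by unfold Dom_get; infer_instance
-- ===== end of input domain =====

-- B replaces A's O(n) divisor-counting loop by an O(sqrt n) search for the least i with
-- i*i >= n (the divisor count is odd iff n is a perfect square); return value only.

-- ===== PORT A =====
def get (n : Int) : Int :=
  let ans := (PySem.List.pyRange 1 (n + 1) 1).foldl
    (fun ans i => if PySem.Int.mod n i == 0 then ans + 1 else ans) 0
  if PySem.Int.mod ans 2 == 0 then n else -n

-- ===== PORT B =====
-- the `while i*i < n: i += 1` loop of Source B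
def getAltLoop (n i : Int) : Int :=
  if i * i < n then getAltLoop n (i + 1) else i
termination_by (n - i).toNat
decreasing_by
  rename_i h
  have hin : i < n := by nlinarith [mul_self_nonneg i]
  omega

def get_alt (n : Int) : Int :=
  let i := getAltLoop n 1
  if i * i == n then -n else n

-- ===== PRECONDITION & SPEC =====
def Spec_get (n : Int) (out : Int) : Prop := out = get_alt n
instance (n : Int) (out : Int) : Decidable (Spec_get n out) := by unfold Spec_get; infer_instance

-- ===== CLAIM (what is proved, stated in full; the proofs are below) =====
def Claim_equal_get : Prop := ∀ (n : Int), Dom_get n → Spec_get n (get n)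

-- ===== LEMMAS AND PROOFS =====

-- Parity of the size of a finite set carrying an involution is the parity of its fixed-point set.
lemma card_filter_fixed_parity {α : Type} [DecidableEq α] (f : α → α) (s : Finset α)
    (hmem : ∀ a ∈ s, f a ∈ s) (hinv : ∀ a ∈ s, f (f a) = a) :
    s.card % 2 = (s.filter fun a => f a = a).card % 2 := by
  induction s using Finset.strongInduction with
  | _ s ih => ?_
  by_cases hall : ∀ a ∈ s, f a = a
  · rw [Finset.filter_true_of_mem hall]
  · rw [not_forall] at hall
    simp only [not_forall, exists_prop] at hall
    obtain ⟨a, ha, hfa⟩ := hall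
    have hfas : f a ∈ s := hmem a ha
    have hane : a ≠ f a := fun h => hfa h.symm
    have hffa : f (f a) = a := hinv a ha
    set t : Finset α := s \ {a, f a} with ht
    have hsub : ({a, f a} : Finset α) ⊆ s := by
      intro x hx
      simp only [Finset.mem_insert, Finset.mem_singleton] at hx
      rcases hx with rfl | rfl <;> assumption
    have hinter : ({a, f a} : Finset α) ∩ s = {a, f a} := Finset.inter_eq_left.mpr hsub
    have hcardt : t.card = s.card - 2 := by
      rw [ht, Finset.card_sdiff, hinter, Finset.card_pair hane]
    have h2le : 2 ≤ s.card := by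
      calc 2 = ({a, f a} : Finset α).card := (Finset.card_pair hane).symm
      _ ≤ s.card := Finset.card_le_card hsub
    have htss : t ⊂ s :=
      (Finset.ssubset_iff_of_subset Finset.sdiff_subset).mpr ⟨a, ha, by simp⟩
    have hmemt : ∀ b ∈ t, f b ∈ t := by
      intro b hb
      rw [ht] at hb ⊢
      simp only [Finset.mem_sdiff, Finset.mem_insert, Finset.mem_singleton] at hb ⊢
      obtain ⟨hbs, hb2⟩ := hb
      refine ⟨hmem b hbs, fun hor => hb2 ?_⟩
      rcases hor with h | h
      · right; rw [← hinv b hbs, h]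
      · left; rw [← hinv b hbs, h]; exact hffa
    have hinvt : ∀ b ∈ t, f (f b) = b := by
      intro b hb; exact hinv b (Finset.mem_sdiff.mp (ht ▸ hb)).1
    have hfilt : (t.filter fun b => f b = b) = s.filter fun b => f b = b := by
      ext x
      simp only [ht, Finset.mem_filter, Finset.mem_sdiff, Finset.mem_insert,
        Finset.mem_singleton]
      constructor
      · rintro ⟨⟨hx, -⟩, hfx⟩; exact ⟨hx, hfx⟩
      · rintro ⟨hx, hfx⟩
        refine ⟨⟨hx, fun hor => ?_⟩, hfx⟩
        rcases hor with rfl | rfl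
        · exact hfa hfx
        · exact hane (hffa.symm.trans hfx)
    have := ih t htss hmemt hinvt
    rw [← hfilt]
    omega

-- For m ≠ 0 the divisor count of m is odd exactly when m is a perfect square.
lemma odd_card_divisors_iff (m : ℕ) (hm : m ≠ 0) :
    (Nat.divisors m).card % 2 = 1 ↔ ∃ r : ℕ, r * r = m := by
  have hmem : ∀ d ∈ Nat.divisors m, m / d ∈ Nat.divisors m := by
    intro d hd
    rw [Nat.mem_divisors] at hd ⊢
    exact ⟨Nat.div_dvd_of_dvd hd.1, hm⟩
  have hinv : ∀ d ∈ Nat.divisors m, m / (m / d) = d := by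
    intro d hd
    rw [Nat.mem_divisors] at hd
    exact Nat.div_div_self hd.1 hm
  have hpar : (Nat.divisors m).card % 2
      = ((Nat.divisors m).filter fun d => m / d = d).card % 2 :=
    card_filter_fixed_parity (fun d => m / d) (Nat.divisors m) hmem hinv
  have hfix : ∀ d ∈ Nat.divisors m, m / d = d → d * d = m := by
    intro d hd hdd
    have hdvd : d ∣ m := (Nat.mem_divisors.mp hd).1
    have := Nat.div_mul_cancel hdvd
    rw [hdd] at this; exact this
  have hle1 : ((Nat.divisors m).filter fun d => m / d = d).card ≤ 1 := by
    rw [Finset.card_le_one]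
    intro a ha b hb
    rw [Finset.mem_filter] at ha hb
    have ha' := hfix a ha.1 ha.2
    have hb' := hfix b hb.1 hb.2
    exact Nat.mul_self_inj.mp (ha'.trans hb'.symm)
  constructor
  · intro h
    have hpos : ((Nat.divisors m).filter fun d => m / d = d).card = 1 := by omega
    obtain ⟨d, hd⟩ := Finset.card_eq_one.mp hpos
    have hdm : d ∈ (Nat.divisors m).filter fun d => m / d = d := by simp [hd]
    rw [Finset.mem_filter] at hdm
    exact ⟨d, hfix d hdm.1 hdm.2⟩
  · rintro ⟨r, hr⟩
    have hr0 : r ≠ 0 := by rintro rfl; exact hm hr.symm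
    have hrdvd : r ∣ m := ⟨r, hr.symm⟩
    have hrm : r ∈ (Nat.divisors m).filter fun d => m / d = d := by
      rw [Finset.mem_filter, Nat.mem_divisors]
      refine ⟨⟨hrdvd, hm⟩, ?_⟩
      rw [← hr, Nat.mul_div_cancel_left r (Nat.pos_of_ne_zero hr0)]
    have h1 : 1 ≤ ((Nat.divisors m).filter fun d => m / d = d).card :=
      Finset.card_pos.mpr ⟨r, hrm⟩
    omega

-- A's loop counts the divisors of n (n ≥ 1).
lemma get_count (n : Int) (hn : 1 ≤ n) :
    (PySem.List.pyRange 1 (n + 1) 1).foldl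
      (fun ans i => if PySem.Int.mod n i == 0 then ans + 1 else ans) (0 : Int)
    = ((Nat.divisors n.toNat).card : Int) := by
  rw [PySem.List.foldl_count_if]
  rw [PySem.List.pyRange_one, List.countP_map]
  have hcast : (n + 1 - 1).toNat = n.toNat := by omega
  rw [hcast]
  have hpred : ∀ k : ℕ,
      (PySem.Int.mod n (1 + (k : Int)) == 0) = decide ((k + 1) ∣ n.toNat) := by
    intro k
    have h1 : (1 + (k : Int)) = ((k + 1 : ℕ) : Int) := by push_cast; ring
    have hnn : ((n.toNat : ℕ) : Int) = n := by omega
    have h2 : PySem.Int.mod n (1 + (k : Int)) = 0 ↔ (k + 1) ∣ n.toNat := by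
      rw [PySem.Int.mod_eq_zero_iff_dvd, h1]
      constructor
      · intro h
        exact Int.ofNat_dvd.mp (by rw [hnn]; exact h)
      · intro h
        have h4 := Int.ofNat_dvd.mpr h
        rwa [hnn] at h4
    by_cases hk : (k + 1) ∣ n.toNat
    · simp [hk, h2.mpr hk]
    · simp only [hk, decide_false]
      rw [beq_eq_false_iff_ne]
      exact fun hc => hk (h2.mp hc)
  have hfun : ((fun i => PySem.Int.mod n i == 0) ∘ fun k : ℕ => (1 : Int) + k)
      = fun k : ℕ => decide ((k + 1) ∣ n.toNat) := by
    funext k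
    simp only [Function.comp_apply]
    exact hpred k
  rw [hfun, zero_add]
  congr 1
  have hcnt : ((Finset.range n.toNat).filter fun k => (k + 1) ∣ n.toNat).card
      = (List.range n.toNat).countP fun k => decide ((k + 1) ∣ n.toNat) := by
    simp [Finset.filter, Finset.card, Finset.range, List.countP_eq_length_filter,
      Multiset.range]
  rw [← hcnt]
  -- bijection d ↦ d - 1 between the divisors of n.toNat and the filtered range
  refine (Finset.card_bij' (fun d _ => d - 1) (fun k _ => k + 1) ?_ ?_ ?_ ?_).symm
  · intro d hd
    show d - 1 ∈ (Finset.range n.toNat).filter fun k => (k + 1) ∣ n.toNat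
    rw [Nat.mem_divisors] at hd
    have h1 : 1 ≤ d := Nat.pos_of_dvd_of_pos hd.1 (Nat.pos_of_ne_zero hd.2)
    have h2 : d ≤ n.toNat := Nat.le_of_dvd (Nat.pos_of_ne_zero hd.2) hd.1
    simp only [Finset.mem_filter, Finset.mem_range]
    refine ⟨by omega, ?_⟩
    rw [Nat.sub_add_cancel h1]
    exact hd.1
  · intro k hk
    show k + 1 ∈ Nat.divisors n.toNat
    simp only [Finset.mem_filter, Finset.mem_range] at hk
    rw [Nat.mem_divisors]
    exact ⟨hk.2, by omega⟩
  · intro d hd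
    show d - 1 + 1 = d
    rw [Nat.mem_divisors] at hd
    have h1 : 1 ≤ d := Nat.pos_of_dvd_of_pos hd.1 (Nat.pos_of_ne_zero hd.2)
    omega
  · intro k _
    show k + 1 - 1 = k
    omega

-- B's loop result is at least its starting index.
lemma getAltLoop_ge (n : Int) : ∀ i : Int, i ≤ getAltLoop n i := by
  intro i
  induction i using getAltLoop.induct n with
  | case1 i h ih => rw [getAltLoop, if_pos h]; omega
  | case2 i h => rw [getAltLoop, if_neg h]

lemma getAltLoop_eq_of_sq (n r : Int) (hr : 1 ≤ r) (hrr : r * r = n) :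
    ∀ i : Int, 1 ≤ i → i ≤ r → getAltLoop n i = r := by
  intro i
  induction i using getAltLoop.induct n with
  | case1 i h ih =>
    intro h1 hir
    rw [getAltLoop, if_pos h]
    rcases eq_or_lt_of_le hir with rfl | hlt
    · rw [hrr] at h; omega
    · exact ih (by omega) (by omega)
  | case2 i h =>
    intro h1 hir
    rw [getAltLoop, if_neg h]
    have hri : r ≤ i := by
      by_contra hc
      have hir2 : i < r := by omega
      have hlt : i * i < r * r := by nlinarith
      rw [hrr] at hlt
      exact h hlt
    omega

-- B's square test answers "is n the square of a positive integer".
lemma getAltLoop_sq_iff (n : Int) :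
    (getAltLoop n 1 * getAltLoop n 1 = n) ↔ ∃ r : Int, 1 ≤ r ∧ r * r = n := by
  constructor
  · intro h
    exact ⟨getAltLoop n 1, getAltLoop_ge n 1, h⟩
  · rintro ⟨r, hr, hrr⟩
    rw [getAltLoop_eq_of_sq n r hr hrr 1 le_rfl hr]
    exact hrr

-- ===== VERDICT (by name: the statement is the Claim_ definition above) =====
theorem get_spec : Claim_equal_get := by
  intro n _
  show _root_.get n = get_alt n
  rcases le_or_gt n 0 with hn | hn
  · -- n ≤ 0: A's range is empty (ans = 0, even); B's loop stops at i = 1 and 1 ≠ n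
    have hA : _root_.get n = n := by
      unfold _root_.get
      rw [PySem.List.pyRange_one_eq_nil (by omega : n + 1 ≤ 1)]
      simp [PySem.Int.mod]
    have hloop : getAltLoop n 1 = 1 := by
      rw [getAltLoop, if_neg (by nlinarith)]
    have hB : get_alt n = n := by
      rw [get_alt]
      simp only [hloop]
      rw [if_neg (by simp; omega)]
    rw [hA, hB]
  · -- n ≥ 1
    have hm : n.toNat ≠ 0 := by omega
    set c : ℕ := (Nat.divisors n.toNat).card with hc
    have hA : _root_.get n = if c % 2 = 0 then n else -n := by
      unfold _root_.get
      simp only [get_count n (by omega)]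
      rw [PySem.Int.mod_eq_emod_of_pos (by omega : (0:Int) < 2)]
      by_cases h2 : c % 2 = 0
      · rw [if_pos h2, if_pos]
        simp only [beq_iff_eq]
        omega
      · rw [if_neg h2, if_neg]
        simp only [beq_iff_eq]
        omega
    have hbridge : (∃ r : Int, 1 ≤ r ∧ r * r = n) ↔ ∃ r : ℕ, r * r = n.toNat := by
      constructor
      · rintro ⟨r, hr, hrr⟩
        refine ⟨r.toNat, ?_⟩
        have h1 : (r.toNat : Int) = r := by omega
        have h3 : ((r.toNat * r.toNat : ℕ) : Int) = ((n.toNat : ℕ) : Int) := by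
          push_cast
          rw [h1, hrr]; omega
        exact_mod_cast h3
      · rintro ⟨r, hrr⟩
        have hr0 : r ≠ 0 := by rintro rfl; simp at hrr; omega
        refine ⟨(r : Int), by exact_mod_cast Nat.one_le_iff_ne_zero.mpr hr0, ?_⟩
        have h3 : ((r * r : ℕ) : Int) = n := by rw [hrr]; omega
        exact_mod_cast h3
    have hB : get_alt n = if c % 2 = 1 then -n else n := by
      rw [get_alt]
      by_cases hsq : c % 2 = 1
      · rw [if_pos hsq]
        have hex : ∃ r : Int, 1 ≤ r ∧ r * r = n :=
          hbridge.mpr ((odd_card_divisors_iff n.toNat hm).mp hsq)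
        rw [if_pos (by simp [(getAltLoop_sq_iff n).mpr hex])]
      · rw [if_neg hsq]
        have hnex : ¬ (getAltLoop n 1 * getAltLoop n 1 = n) := by
          rw [getAltLoop_sq_iff n, hbridge]
          intro hex
          exact hsq ((odd_card_divisors_iff n.toNat hm).mpr hex)
        rw [if_neg (by simpa using hnex)]
    rw [hA, hB]
    rcases Nat.mod_two_eq_zero_or_one c with h | h <;> simp [h]
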